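-- pv_equiv track=rewrite | github.com/Axelvel/AICup | date.py | trivial_date
-- ===== SOURCE A (Python) =====
-- def trivial_date(date, raw):
--     trivial = []
--     raw_trivial = []  # New list to store raw strings corresponding to trivial dates
--
--     for file, raw_strings in zip(date, raw):
--         file_trivial = []
--         file_raw_trivial = []
--         max_first = 0
--         max_second = 0
--
--         for item, raw_string in zip(file, raw_strings):
--             splitted = item.split("-")
--             if len(splitted) == 3 and splitted[0] != "" and splitted[1] != "" and splitted[2] != "":
--                 if int(splitted[0]) > max_first:
--                     max_first = int(splitted[0])
--                 if int(splitted[1]) > max_second: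
--                     max_second = int(splitted[1])
--
--         if max_second > 12 and max_first <= 12:
--             for item, raw_string in zip(file, raw_strings):
--                 splitted = item.split("-")
--                 if len(splitted) == 3 and splitted[0] != "" and splitted[1] != "" and splitted[2] != "":
--                     file_trivial.append(f"{splitted[1]}/{splitted[0]}/{splitted[2]}")
--                     file_raw_trivial.append(raw_string)
--             trivial.append(file_trivial)
--             raw_trivial.append(file_raw_trivial)
--
--         elif max_first > 12 and max_second <= 12:
--             for item, raw_string in zip(file, raw_strings):
--                 splitted = item.split("-")
--                 if len(splitted) == 3 and splitted[0] != "" and splitted[1] != "" and splitted[2] != "":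
--                     file_trivial.append(f"{splitted[0]}/{splitted[1]}/{splitted[2]}")
--                     file_raw_trivial.append(raw_string)
--             trivial.append(file_trivial)
--             raw_trivial.append(file_raw_trivial)
--
--         else:
--             for item, raw_string in zip(file, raw_strings):
--                 splitted = item.split("-")
--                 if len(splitted) == 3 and splitted[0] != "" and splitted[1] != "" and splitted[2] != "":
--                     file_trivial.append(item)
--                     file_raw_trivial.append(raw_string)
--             trivial.append(file_trivial)
--             raw_trivial.append(file_raw_trivial)
--
--     return trivial, raw_trivial
-- ===== SOURCE B (Python) =====
-- def trivial_date(date, raw):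
--     trivial = []
--     raw_trivial = []
--     for file, raw_strings in zip(date, raw):
--         # One pass: build all three candidate renderings eagerly, plus two flags
--         # saying whether any first/second field exceeds 12, then pick one list.
--         swapped = []   # second/first/third
--         slashed = []   # first/second/third
--         dashed = []    # items untouched
--         kept = []      # raw strings of the valid entries
--         first_big = False   # some first field > 12
--         second_big = False  # some second field > 12
--         for item, raw_string in zip(file, raw_strings):
--             p = item.split("-")
--             if len(p) == 3 and "" not in p:
--                 if int(p[0]) > 12:
--                     first_big = True
--                 if int(p[1]) > 12:
--                     second_big = True
--                 swapped.append(p[1] + "/" + p[0] + "/" + p[2])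
--                 slashed.append(p[0] + "/" + p[1] + "/" + p[2])
--                 dashed.append(item)
--                 kept.append(raw_string)
--         if second_big and not first_big:
--             trivial.append(swapped)
--         elif first_big and not second_big:
--             trivial.append(slashed)
--         else:
--             trivial.append(dashed)
--         raw_trivial.append(kept)
--     return trivial, raw_trivial
-- ===== Notes on version B (the rewrite author's own statement) =====
-- stated objective: alternative
-- what changed: B makes a single pass per file that eagerly builds all three candidate output lists at once and tracks two boolean any-field-exceeds-12 flags (instead of integer maxima), then selects which prebuilt list to keep; A scans twice, first computing integer maxima and then rerunning one of three duplicated reformat loops.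
import Mathlib
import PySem

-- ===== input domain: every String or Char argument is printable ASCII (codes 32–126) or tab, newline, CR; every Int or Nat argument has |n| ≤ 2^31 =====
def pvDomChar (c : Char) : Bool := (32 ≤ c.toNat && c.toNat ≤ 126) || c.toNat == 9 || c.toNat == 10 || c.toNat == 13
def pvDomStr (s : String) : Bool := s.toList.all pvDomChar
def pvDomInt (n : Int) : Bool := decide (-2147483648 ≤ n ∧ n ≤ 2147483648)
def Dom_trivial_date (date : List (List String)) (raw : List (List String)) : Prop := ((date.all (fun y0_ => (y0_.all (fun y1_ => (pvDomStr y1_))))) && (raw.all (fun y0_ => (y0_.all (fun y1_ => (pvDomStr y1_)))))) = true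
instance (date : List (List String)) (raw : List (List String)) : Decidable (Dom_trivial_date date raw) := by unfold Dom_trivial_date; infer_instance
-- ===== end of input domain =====

-- B replaces A's two scans per file (integer maxima, then one of three duplicated reformat
-- loops) by ONE scan that eagerly builds all three candidate output lists and two boolean
-- "any field > 12" flags, then selects which prebuilt list to keep (objective: alternative).

-- shared helper: the validity test both Pythons perform before using the split
-- (len == 3 and all three parts nonempty), returning the three parts
def pvParts (item : String) : Option (String × String × String) :=
  match PySem.Str.split? item "-" with
  | some [a, b, c] => if a != "" && b != "" && c != "" then some (a, b, c) else none
  | _ => none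

-- ===== PORT A =====
-- first inner loop of A: the running maxima of int(splitted[0]) / int(splitted[1]).
-- `.getD 0` is exact on Pre_trivial_date (there int() never raises on a valid entry).
def pvMaxStep (m : Int × Int) (ir : String × String) : Int × Int :=
  match pvParts ir.1 with
  | some p =>
      let v0 := (PySem.Int.ofStr? p.1).getD 0
      let v1 := (PySem.Int.ofStr? p.2.1).getD 0
      (if v0 > m.1 then v0 else m.1, if v1 > m.2 then v1 else m.2)
  | none => m

-- the three reformat loops of A's three branches
def pvLoopStep1 (acc : List String × List String) (ir : String × String) : List String × List String :=
  match pvParts ir.1 with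
  | some p => (acc.1 ++ [PySem.Str.join "/" [p.2.1, p.1, p.2.2]], acc.2 ++ [ir.2])
  | none => acc

def pvLoopStep2 (acc : List String × List String) (ir : String × String) : List String × List String :=
  match pvParts ir.1 with
  | some p => (acc.1 ++ [PySem.Str.join "/" [p.1, p.2.1, p.2.2]], acc.2 ++ [ir.2])
  | none => acc

def pvLoopStep3 (acc : List String × List String) (ir : String × String) : List String × List String :=
  match pvParts ir.1 with
  | some _ => (acc.1 ++ [ir.1], acc.2 ++ [ir.2])
  | none => acc

def trivial_date (date : List (List String)) (raw : List (List String)) :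
    List (List String) × List (List String) :=
  (List.zip date raw).foldl
    (fun acc fr =>
      let entries := List.zip fr.1 fr.2
      let m := entries.foldl pvMaxStep (0, 0)
      let ft :=
        if m.2 > 12 ∧ m.1 ≤ 12 then entries.foldl pvLoopStep1 ([], [])
        else if m.1 > 12 ∧ m.2 ≤ 12 then entries.foldl pvLoopStep2 ([], [])
        else entries.foldl pvLoopStep3 ([], [])
      (acc.1 ++ [ft.1], acc.2 ++ [ft.2]))
    ([], [])

-- ===== PORT B =====
-- B's single scan: state = (swapped, slashed, dashed, kept, first_big, second_big).
-- `p[1] + "/" + p[0] + "/" + p[2]` is ported as the literal concatenation.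
def pvAltStep (st : (List String × List String × List String × List String) × Bool × Bool)
    (ir : String × String) : (List String × List String × List String × List String) × Bool × Bool :=
  match pvParts ir.1 with
  | some p =>
      let f1 := if (PySem.Int.ofStr? p.1).getD 0 > 12 then true else st.2.1
      let f2 := if (PySem.Int.ofStr? p.2.1).getD 0 > 12 then true else st.2.2
      ((st.1.1 ++ [p.2.1 ++ "/" ++ p.1 ++ "/" ++ p.2.2],
        st.1.2.1 ++ [p.1 ++ "/" ++ p.2.1 ++ "/" ++ p.2.2],
        st.1.2.2.1 ++ [ir.1],
        st.1.2.2.2 ++ [ir.2]), f1, f2)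
  | none => st

def trivial_date_alt (date : List (List String)) (raw : List (List String)) :
    List (List String) × List (List String) :=
  (List.zip date raw).foldl
    (fun acc fr =>
      let s := (List.zip fr.1 fr.2).foldl pvAltStep (([], [], [], []), false, false)
      let chosen :=
        if s.2.2 && !s.2.1 then s.1.1
        else if s.2.1 && !s.2.2 then s.1.2.1
        else s.1.2.2.1
      (acc.1 ++ [chosen], acc.2 ++ [s.1.2.2.2]))
    ([], [])

-- ===== PRECONDITION & SPEC =====
-- Pre_ excludes exactly the inputs where A raises ValueError: a zipped entry that splits into
-- three nonempty parts whose first or second part int() cannot parse.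
def Pre_trivial_date (date : List (List String)) (raw : List (List String)) : Prop :=
  ∀ fr ∈ List.zip date raw, ∀ ir ∈ List.zip fr.1 fr.2,
    (match pvParts ir.1 with
     | some p => (PySem.Int.ofStr? p.1).isSome && (PySem.Int.ofStr? p.2.1).isSome
     | none => true) = true
instance (date : List (List String)) (raw : List (List String)) :
    Decidable (Pre_trivial_date date raw) := by unfold Pre_trivial_date; infer_instance

def pvWitness_trivial_date : List (List String) × List (List String) :=
  ([["13-5-2020", "x", "1-2-3"]], [["r1", "r2", "r3"]])

def Spec_trivial_date (date : List (List String)) (raw : List (List String))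
    (out : List (List String) × List (List String)) : Prop := out = trivial_date_alt date raw
instance (date : List (List String)) (raw : List (List String))
    (out : List (List String) × List (List String)) : Decidable (Spec_trivial_date date raw out) := by
  unfold Spec_trivial_date; infer_instance

-- ===== CLAIM (what is proved, stated in full; the proofs are below) =====
def Claim_equal_trivial_date : Prop := ∀ (date : List (List String)) (raw : List (List String)), Dom_trivial_date date raw → Pre_trivial_date date raw → Spec_trivial_date date raw (trivial_date date raw)

-- ===== LEMMAS AND PROOFS =====

-- the valid entries of a file with their parts, in order
def pvBuf (entries : List (String × String)) :
    List ((String × String × String) × String × String) :=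
  entries.filterMap (fun ir => (pvParts ir.1).map (fun p => (p, ir.1, ir.2)))

def pvV0 (e : (String × String × String) × String × String) : Int := (PySem.Int.ofStr? e.1.1).getD 0
def pvV1 (e : (String × String × String) × String × String) : Int := (PySem.Int.ofStr? e.1.2.1).getD 0

-- B's scan, characterised: maps over the buffer plus "any > 12" flags
theorem pvAlt_aux (entries : List (String × String)) :
    ∀ (sw sl da kp : List String) (f1 f2 : Bool),
      entries.foldl pvAltStep ((sw, sl, da, kp), f1, f2) =
        ((sw ++ (pvBuf entries).map (fun e => e.1.2.1 ++ "/" ++ e.1.1 ++ "/" ++ e.1.2.2),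
          sl ++ (pvBuf entries).map (fun e => e.1.1 ++ "/" ++ e.1.2.1 ++ "/" ++ e.1.2.2),
          da ++ (pvBuf entries).map (fun e => e.2.1),
          kp ++ (pvBuf entries).map (fun e => e.2.2)),
         f1 || (pvBuf entries).any (fun e => decide (12 < pvV0 e)),
         f2 || (pvBuf entries).any (fun e => decide (12 < pvV1 e))) := by
  induction entries with
  | nil => intro sw sl da kp f1 f2; simp [pvBuf]
  | cons ir es ih =>
      intro sw sl da kp f1 f2
      cases h : pvParts ir.1 with
      | none =>
          simp only [List.foldl_cons, pvAltStep, h, pvBuf, List.filterMap_cons]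
          exact ih sw sl da kp f1 f2
      | some p =>
          simp only [List.foldl_cons, pvAltStep, h, pvBuf, List.filterMap_cons, Option.map_some]
          rw [ih]
          simp only [pvBuf, List.map_cons, List.any_cons, List.append_assoc, List.cons_append,
            List.nil_append, pvV0, pvV1]
          by_cases h0 : (12:Int) < (PySem.Int.ofStr? p.1).getD 0 <;>
            by_cases h1 : (12:Int) < (PySem.Int.ofStr? p.2.1).getD 0 <;>
            simp [h0, h1, gt_iff_lt]

-- A's maxima, characterised by the same flags
theorem pvMax_aux (entries : List (String × String)) :
    ∀ (m : Int × Int),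
      ((12 < (entries.foldl pvMaxStep m).1 ↔
          12 < m.1 ∨ (pvBuf entries).any (fun e => decide (12 < pvV0 e)) = true) ∧
       (12 < (entries.foldl pvMaxStep m).2 ↔
          12 < m.2 ∨ (pvBuf entries).any (fun e => decide (12 < pvV1 e)) = true)) := by
  induction entries with
  | nil => intro m; simp [pvBuf]
  | cons ir es ih =>
      intro m
      cases h : pvParts ir.1 with
      | none =>
          simp only [List.foldl_cons, pvMaxStep, h, pvBuf, List.filterMap_cons]
          exact ih m
      | some p =>
          have hstep : pvMaxStep m ir =
              ((if (PySem.Int.ofStr? p.1).getD 0 > m.1 then (PySem.Int.ofStr? p.1).getD 0 else m.1),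
               (if (PySem.Int.ofStr? p.2.1).getD 0 > m.2 then (PySem.Int.ofStr? p.2.1).getD 0 else m.2)) := by
            simp [pvMaxStep, h]
          have hbuf : pvBuf (ir :: es) = (p, ir.1, ir.2) :: pvBuf es := by
            simp [pvBuf, List.filterMap_cons, h]
          rw [List.foldl_cons, hstep, hbuf]
          simp only [List.any_cons, Bool.or_eq_true, decide_eq_true_eq, pvV0, pvV1]
          generalize (PySem.Int.ofStr? p.1).getD 0 = a at *
          generalize (PySem.Int.ofStr? p.2.1).getD 0 = b at *
          have ih' := ih ((if a > m.1 then a else m.1), (if b > m.2 then b else m.2))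
          simp only [List.any_cons, Bool.or_eq_true, decide_eq_true_eq, pvV0, pvV1] at ih' ⊢
          constructor
          · rw [ih'.1]
            have e1 : (12 < (if a > m.1 then a else m.1)) ↔ (12 < m.1 ∨ 12 < a) := by
              split_ifs <;> omega
            rw [e1, or_assoc]
          · rw [ih'.2]
            have e2 : (12 < (if b > m.2 then b else m.2)) ↔ (12 < m.2 ∨ 12 < b) := by
              split_ifs <;> omega
            rw [e2, or_assoc]

-- A's three reformat loops are maps over the buffer
theorem pvLoop_aux (fmt : (String × String × String) → String → String)
    (entries : List (String × String)) :
    ∀ (acc : List String × List String),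
      entries.foldl
          (fun acc ir =>
            match pvParts ir.1 with
            | some p => (acc.1 ++ [fmt p ir.1], acc.2 ++ [ir.2])
            | none => acc) acc =
        (acc.1 ++ (pvBuf entries).map (fun e => fmt e.1 e.2.1),
         acc.2 ++ (pvBuf entries).map (fun e => e.2.2)) := by
  induction entries with
  | nil => intro acc; simp [pvBuf]
  | cons ir es ih =>
      intro acc
      cases h : pvParts ir.1 with
      | none =>
          simp only [List.foldl_cons, h, pvBuf, List.filterMap_cons]
          exact ih acc
      | some p =>
          simp only [List.foldl_cons, h, pvBuf, List.filterMap_cons, Option.map_some]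
          rw [ih]
          simp [pvBuf, List.append_assoc]

theorem pvJoin3 (a b c : String) : PySem.Str.join "/" [a, b, c] = a ++ "/" ++ b ++ "/" ++ c := by
  rw [← String.toList_inj]
  simp [PySem.Str.join, PySem.Chars.join, List.intercalate]


theorem pvLoop1_eq (entries : List (String × String)) :
    entries.foldl pvLoopStep1 ([], []) =
      ((pvBuf entries).map (fun e => PySem.Str.join "/" [e.1.2.1, e.1.1, e.1.2.2]),
       (pvBuf entries).map (fun e => e.2.2)) := by
  have h := pvLoop_aux (fun p _ => PySem.Str.join "/" [p.2.1, p.1, p.2.2]) entries ([], [])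
  simpa [pvLoopStep1] using h

theorem pvLoop2_eq (entries : List (String × String)) :
    entries.foldl pvLoopStep2 ([], []) =
      ((pvBuf entries).map (fun e => PySem.Str.join "/" [e.1.1, e.1.2.1, e.1.2.2]),
       (pvBuf entries).map (fun e => e.2.2)) := by
  have h := pvLoop_aux (fun p _ => PySem.Str.join "/" [p.1, p.2.1, p.2.2]) entries ([], [])
  simpa [pvLoopStep2] using h

theorem pvLoop3_eq (entries : List (String × String)) :
    entries.foldl pvLoopStep3 ([], []) =
      ((pvBuf entries).map (fun e => e.2.1), (pvBuf entries).map (fun e => e.2.2)) := by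
  have h := pvLoop_aux (fun _ item => item) entries ([], [])
  simpa [pvLoopStep3] using h

theorem trivial_date_eq (date : List (List String)) (raw : List (List String)) :
    trivial_date date raw = trivial_date_alt date raw := by
  unfold trivial_date trivial_date_alt
  congr 1
  funext acc fr
  rw [pvAlt_aux (List.zip fr.1 fr.2) [] [] [] [] false false]
  simp only [List.nil_append, Bool.false_or]
  set b1 := (pvBuf (List.zip fr.1 fr.2)).any (fun e => decide (12 < pvV0 e)) with hb1
  set b2 := (pvBuf (List.zip fr.1 fr.2)).any (fun e => decide (12 < pvV1 e)) with hb2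
  set m := (List.zip fr.1 fr.2).foldl pvMaxStep (0, 0) with hmm
  have hm := pvMax_aux (List.zip fr.1 fr.2) (0, 0)
  rw [← hmm, ← hb1, ← hb2] at hm
  have h1 : 12 < m.1 ↔ b1 = true := by
    rw [hm.1]
    constructor
    · rintro (h | h)
      · exact absurd h (by norm_num)
      · exact h
    · exact Or.inr
  have h2 : 12 < m.2 ↔ b2 = true := by
    rw [hm.2]
    constructor
    · rintro (h | h)
      · exact absurd h (by norm_num)
      · exact h
    · exact Or.inr
  by_cases p1 : 12 < m.1 <;> by_cases p2 : 12 < m.2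
  · -- both big: else branch on both sides
    have e1 : b1 = true := h1.mp p1
    have e2 : b2 = true := h2.mp p2
    rw [if_neg (by omega), if_neg (by omega), e1, e2]
    simp only [Bool.not_true, Bool.and_false, Bool.false_and, if_neg (by simp : ¬(false = true)),
      if_neg (by simp : ¬(false = true))]
    rw [pvLoop3_eq]
  · -- first big only: slashed
    have e1 : b1 = true := h1.mp p1
    have e2 : b2 = false := Bool.eq_false_iff.mpr (fun h => p2 (h2.mpr h))
    rw [if_neg (by omega), if_pos (by omega), e1, e2]
    simp only [Bool.not_true, Bool.and_false, Bool.not_false, Bool.and_true,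
      if_neg (by simp : ¬(false = true)), if_pos rfl]
    rw [pvLoop2_eq]
    simp [pvJoin3]
  · -- second big only: swapped
    have e1 : b1 = false := Bool.eq_false_iff.mpr (fun h => p1 (h1.mpr h))
    have e2 : b2 = true := h2.mp p2
    rw [if_pos (by omega), e1, e2]
    simp only [Bool.not_false, Bool.and_true, if_pos rfl]
    rw [pvLoop1_eq]
    simp [pvJoin3]
  · -- neither big: else on both sides
    have e1 : b1 = false := Bool.eq_false_iff.mpr (fun h => p1 (h1.mpr h))
    have e2 : b2 = false := Bool.eq_false_iff.mpr (fun h => p2 (h2.mpr h))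
    rw [if_neg (by omega), if_neg (by omega), e1, e2]
    simp only [Bool.not_false, Bool.and_false, Bool.false_and, Bool.and_true,
      if_neg (by simp : ¬(false = true))]
    rw [pvLoop3_eq]

-- ===== VERDICT (by name: the statement is the Claim_ definition above) =====
theorem trivial_date_spec : Claim_equal_trivial_date := by
  intro date raw _ _
  unfold Spec_trivial_date
  exact trivial_date_eq date raw
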